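-- pv_equiv track=rewrite | github.com/EdinburghClinicalNLP/semeval_nli4ct | scripts/evaluate_test.py | extract_by_intervention
-- ===== SOURCE A (Python) =====
-- def extract_by_intervention(predictions, gold):
--     para_predictions = {}
--     cont_predictions = {}
--     numerical_para_predictions = {}
--     numerical_cont_predictions = {}
--     definitions_predictions = {}
--     for key in predictions.keys():
--         if "Intervention" not in gold[key].keys():
--             continue
--         if gold[key]["Intervention"] == "Paraphrase":
--             para_predictions[key] = predictions[key]
--         elif gold[key]["Intervention"] == "Contradiction":
--             cont_predictions[key] = predictions[key]
--         elif gold[key]["Intervention"] == "Numerical_paraphrase":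
--             numerical_para_predictions[key] = predictions[key]
--         elif gold[key]["Intervention"] == "Numerical_contradiction":
--             numerical_cont_predictions[key] = predictions[key]
--         elif gold[key]["Intervention"] == "Text_appended":
--             definitions_predictions[key] = predictions[key]
--     return (
--         para_predictions,
--         cont_predictions,
--         numerical_para_predictions,
--         numerical_cont_predictions,
--         definitions_predictions,
--     )
-- ===== SOURCE B (Python) =====
-- def extract_by_intervention(predictions, gold):
--     def bucket(label):
--         return {k: v for k, v in predictions.items() if gold[k].get("Intervention") == label}
--     return (
--         bucket("Paraphrase"),
--         bucket("Contradiction"),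
--         bucket("Numerical_paraphrase"),
--         bucket("Numerical_contradiction"),
--         bucket("Text_appended"),
--     )
-- ===== Notes on version B (the rewrite author's own statement) =====
-- stated objective: simpler
-- what changed: Replaces the single pass with an if/elif chain mutating five accumulator dicts by five independent dict-comprehension filters of predictions.items(), one per intervention label, using gold[k].get('Intervention') so the membership test disappears.
import Mathlib
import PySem

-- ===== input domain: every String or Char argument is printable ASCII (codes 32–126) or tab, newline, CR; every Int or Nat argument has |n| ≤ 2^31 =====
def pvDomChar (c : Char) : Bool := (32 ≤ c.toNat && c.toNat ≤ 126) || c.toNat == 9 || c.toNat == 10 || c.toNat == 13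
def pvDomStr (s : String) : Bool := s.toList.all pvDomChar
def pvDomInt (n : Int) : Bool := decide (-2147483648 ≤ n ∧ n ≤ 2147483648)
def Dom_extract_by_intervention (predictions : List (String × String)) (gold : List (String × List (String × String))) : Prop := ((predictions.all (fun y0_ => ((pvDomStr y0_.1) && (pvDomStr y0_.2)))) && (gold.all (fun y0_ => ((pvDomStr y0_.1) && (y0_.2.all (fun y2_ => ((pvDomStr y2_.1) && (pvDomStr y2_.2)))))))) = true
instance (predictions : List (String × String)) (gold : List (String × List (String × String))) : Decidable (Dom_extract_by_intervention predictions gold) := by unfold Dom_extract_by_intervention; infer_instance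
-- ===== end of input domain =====

-- B replaces A's single pass with an if/elif chain over five accumulator dicts by five independent
-- dict-comprehension filters of predictions.items(), one per intervention label (objective: simpler).


-- ===== PORT A =====
-- gold[key] as a dict (the empty-dict default is only reached outside Pre_, where the Python
-- raises KeyError); both ports access gold[key] through this helper.
def pvGoldAt (gold : List (String × List (String × String))) (key : String) : PySem.Dict String String :=
  PySem.Dict.ofList ((PySem.Dict.ofList gold).getD key [])

def extract_by_intervention (predictions : List (String × String)) (gold : List (String × List (String × String))) : (List (String × String)) × (List (String × String)) × (List (String × String)) × (List (String × String)) × (List (String × String)) :=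
  let P := PySem.Dict.ofList predictions
  let st :=
    P.keys.foldl
      (fun (st : PySem.Dict String String × PySem.Dict String String × PySem.Dict String String × PySem.Dict String String × PySem.Dict String String) key =>
        if (pvGoldAt gold key).contains "Intervention" = false then st
        else if (pvGoldAt gold key).getD "Intervention" "" = "Paraphrase" then
          (st.1.insert key (P.getD key ""), st.2.1, st.2.2.1, st.2.2.2.1, st.2.2.2.2)
        else if (pvGoldAt gold key).getD "Intervention" "" = "Contradiction" then
          (st.1, st.2.1.insert key (P.getD key ""), st.2.2.1, st.2.2.2.1, st.2.2.2.2)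
        else if (pvGoldAt gold key).getD "Intervention" "" = "Numerical_paraphrase" then
          (st.1, st.2.1, st.2.2.1.insert key (P.getD key ""), st.2.2.2.1, st.2.2.2.2)
        else if (pvGoldAt gold key).getD "Intervention" "" = "Numerical_contradiction" then
          (st.1, st.2.1, st.2.2.1, st.2.2.2.1.insert key (P.getD key ""), st.2.2.2.2)
        else if (pvGoldAt gold key).getD "Intervention" "" = "Text_appended" then
          (st.1, st.2.1, st.2.2.1, st.2.2.2.1, st.2.2.2.2.insert key (P.getD key ""))
        else st)
      (PySem.Dict.empty, PySem.Dict.empty, PySem.Dict.empty, PySem.Dict.empty, PySem.Dict.empty)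
  (st.1.items, st.2.1.items, st.2.2.1.items, st.2.2.2.1.items, st.2.2.2.2.items)

-- ===== PORT B =====
-- {k: v for k, v in predictions.items() if gold[k].get("Intervention") == label}
def pvBucket (predictions : List (String × String)) (gold : List (String × List (String × String))) (label : String) : List (String × String) :=
  (PySem.Dict.ofList
    ((PySem.Dict.ofList predictions).items.filter
      (fun kv => (pvGoldAt gold kv.1).get? "Intervention" == some label))).items

def extract_by_intervention_alt (predictions : List (String × String)) (gold : List (String × List (String × String))) : (List (String × String)) × (List (String × String)) × (List (String × String)) × (List (String × String)) × (List (String × String)) :=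
  (pvBucket predictions gold "Paraphrase",
   pvBucket predictions gold "Contradiction",
   pvBucket predictions gold "Numerical_paraphrase",
   pvBucket predictions gold "Numerical_contradiction",
   pvBucket predictions gold "Text_appended")

-- ===== PRECONDITION & SPEC =====
-- Pre_ excludes exactly the inputs on which the Python A raises KeyError: a prediction key absent from gold.
def Pre_extract_by_intervention (predictions : List (String × String)) (gold : List (String × List (String × String))) : Prop :=
  ∀ p ∈ predictions, p.1 ∈ gold.map Prod.fst
instance (predictions : List (String × String)) (gold : List (String × List (String × String))) : Decidable (Pre_extract_by_intervention predictions gold) := by unfold Pre_extract_by_intervention; infer_instance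

def pvWitness_extract_by_intervention : (List (String × String)) × (List (String × List (String × String))) :=
  ([("id1", "Entailment"), ("id2", "Contradiction")],
   [("id1", [("Intervention", "Paraphrase")]), ("id2", [("Type", "Single")])])

def Spec_extract_by_intervention (predictions : List (String × String)) (gold : List (String × List (String × String))) (out : (List (String × String)) × (List (String × String)) × (List (String × String)) × (List (String × String)) × (List (String × String))) : Prop := out = extract_by_intervention_alt predictions gold
instance (predictions : List (String × String)) (gold : List (String × List (String × String))) (out : (List (String × String)) × (List (String × String)) × (List (String × String)) × (List (String × String)) × (List (String × String))) : Decidable (Spec_extract_by_intervention predictions gold out) := by unfold Spec_extract_by_intervention; infer_instance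

-- ===== CLAIM (what is proved, stated in full; the proofs are below) =====
def Claim_equal_extract_by_intervention : Prop := ∀ (predictions : List (String × String)) (gold : List (String × List (String × String))), Dom_extract_by_intervention predictions gold → Pre_extract_by_intervention predictions gold → Spec_extract_by_intervention predictions gold (extract_by_intervention predictions gold)

-- ===== LEMMAS AND PROOFS =====

-- the five-dict state of A's loop, and its body with predictions[key] replaced by the item's value
abbrev pvD5 : Type := PySem.Dict String String × PySem.Dict String String × PySem.Dict String String × PySem.Dict String String × PySem.Dict String String

def pvIv (gold : List (String × List (String × String))) (key : String) : Option String :=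
  (pvGoldAt gold key).get? "Intervention"

def pvStep (gold : List (String × List (String × String))) (st : pvD5) (p : String × String) : pvD5 :=
  if (pvGoldAt gold p.1).contains "Intervention" = false then st
  else if (pvGoldAt gold p.1).getD "Intervention" "" = "Paraphrase" then
    (st.1.insert p.1 p.2, st.2.1, st.2.2.1, st.2.2.2.1, st.2.2.2.2)
  else if (pvGoldAt gold p.1).getD "Intervention" "" = "Contradiction" then
    (st.1, st.2.1.insert p.1 p.2, st.2.2.1, st.2.2.2.1, st.2.2.2.2)
  else if (pvGoldAt gold p.1).getD "Intervention" "" = "Numerical_paraphrase" then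
    (st.1, st.2.1, st.2.2.1.insert p.1 p.2, st.2.2.2.1, st.2.2.2.2)
  else if (pvGoldAt gold p.1).getD "Intervention" "" = "Numerical_contradiction" then
    (st.1, st.2.1, st.2.2.1, st.2.2.2.1.insert p.1 p.2, st.2.2.2.2)
  else if (pvGoldAt gold p.1).getD "Intervention" "" = "Text_appended" then
    (st.1, st.2.1, st.2.2.1, st.2.2.2.1, st.2.2.2.2.insert p.1 p.2)
  else st

lemma pvStep_none {gold : List (String × List (String × String))} {p : String × String}
    (h : pvIv gold p.1 = none) (st : pvD5) : pvStep gold st p = st := by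
  unfold pvStep
  rw [PySem.Dict.contains_eq_isSome_get?]
  unfold pvIv at h
  simp [h]

lemma pvStep_some {gold : List (String × List (String × String))} {p : String × String} {v : String}
    (h : pvIv gold p.1 = some v) (st : pvD5) : pvStep gold st p =
    (if v = "Paraphrase" then
      (st.1.insert p.1 p.2, st.2.1, st.2.2.1, st.2.2.2.1, st.2.2.2.2)
    else if v = "Contradiction" then
      (st.1, st.2.1.insert p.1 p.2, st.2.2.1, st.2.2.2.1, st.2.2.2.2)
    else if v = "Numerical_paraphrase" then
      (st.1, st.2.1, st.2.2.1.insert p.1 p.2, st.2.2.2.1, st.2.2.2.2)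
    else if v = "Numerical_contradiction" then
      (st.1, st.2.1, st.2.2.1, st.2.2.2.1.insert p.1 p.2, st.2.2.2.2)
    else if v = "Text_appended" then
      (st.1, st.2.1, st.2.2.1, st.2.2.2.1, st.2.2.2.2.insert p.1 p.2)
    else st) := by
  unfold pvStep
  rw [PySem.Dict.contains_eq_isSome_get?]
  simp only [PySem.Dict.getD_eq_get?_getD]
  unfold pvIv at h
  simp only [h, Option.isSome_some, Option.getD_some]
  rfl

lemma pvFilter_nodup (l : List (String × String)) (q : String × String → Bool)
    (h : (l.map Prod.fst).Nodup) : ((l.filter q).map Prod.fst).Nodup :=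
  h.sublist ((List.filter_sublist (l := l)).map Prod.fst)

lemma pvOfList_items_of_nodup (l : List (String × String)) (h : (l.map Prod.fst).Nodup) :
    (PySem.Dict.ofList l).items = l := by
  have := PySem.Dict.items_foldl_insert_fresh (l := l) (k := Prod.fst) (v := Prod.snd)
    (d := (PySem.Dict.empty : PySem.Dict String String))
    (by simp [PySem.Dict.contains_empty]) h
  simpa [PySem.Dict.empty] using this

lemma pvBucket_eq_filter (predictions : List (String × String)) (gold : List (String × List (String × String))) (label : String) :
    pvBucket predictions gold label =
      (PySem.Dict.ofList predictions).items.filter (fun kv => pvIv gold kv.1 == some label) := by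
  unfold pvBucket
  rw [pvOfList_items_of_nodup _ (pvFilter_nodup _ _ (PySem.Dict.nodup_keys_ofList predictions))]
  rfl

-- the invariant of A's loop: each bucket's items are its start items plus the matching pairs of l
lemma pvLoop_items (gold : List (String × List (String × String))) :
    ∀ (l : List (String × String)) (d1 d2 d3 d4 d5 : PySem.Dict String String),
      (l.map Prod.fst).Nodup →
      (∀ p ∈ l, d1.contains p.1 = false) → (∀ p ∈ l, d2.contains p.1 = false) →
      (∀ p ∈ l, d3.contains p.1 = false) → (∀ p ∈ l, d4.contains p.1 = false) →
      (∀ p ∈ l, d5.contains p.1 = false) →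
      (l.foldl (pvStep gold) (d1, d2, d3, d4, d5) : pvD5) =
        (PySem.Dict.mk (d1.items ++ l.filter (fun p => pvIv gold p.1 == some "Paraphrase")),
         PySem.Dict.mk (d2.items ++ l.filter (fun p => pvIv gold p.1 == some "Contradiction")),
         PySem.Dict.mk (d3.items ++ l.filter (fun p => pvIv gold p.1 == some "Numerical_paraphrase")),
         PySem.Dict.mk (d4.items ++ l.filter (fun p => pvIv gold p.1 == some "Numerical_contradiction")),
         PySem.Dict.mk (d5.items ++ l.filter (fun p => pvIv gold p.1 == some "Text_appended"))) := by
  intro l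
  induction l with
  | nil =>
    intro d1 d2 d3 d4 d5 _ _ _ _ _ _
    simp
  | cons x xs ih =>
    intro d1 d2 d3 d4 d5 hnd h1 h2 h3 h4 h5
    have hxfresh : ∀ (d : PySem.Dict String String), (∀ p ∈ x :: xs, d.contains p.1 = false) →
        ∀ p ∈ xs, (d.insert x.1 x.2).contains p.1 = false := by
      intro d hd p hp
      rw [PySem.Dict.contains_insert]
      have hne : p.1 ≠ x.1 := by
        intro he
        have : x.1 ∈ xs.map Prod.fst := he ▸ List.mem_map_of_mem hp
        exact (List.nodup_cons.mp hnd).1 this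
      simp [hne, hd p (List.mem_cons_of_mem _ hp)]
    have hins : ∀ (d : PySem.Dict String String), (∀ p ∈ x :: xs, d.contains p.1 = false) →
        (d.insert x.1 x.2).items = d.items ++ [x] := by
      intro d hd
      rw [PySem.Dict.items_insert_of_not_contains d x.2 (hd x List.mem_cons_self)]
    have htail : ∀ (d : PySem.Dict String String), (∀ p ∈ x :: xs, d.contains p.1 = false) →
        ∀ p ∈ xs, d.contains p.1 = false := fun d hd p hp => hd p (List.mem_cons_of_mem _ hp)
    have hnd' := (List.nodup_cons.mp hnd).2
    rw [List.foldl_cons]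
    cases hiv : pvIv gold x.1 with
    | none =>
      rw [pvStep_none hiv,
        ih d1 d2 d3 d4 d5 hnd' (htail d1 h1) (htail d2 h2) (htail d3 h3) (htail d4 h4) (htail d5 h5)]
      simp [hiv]
    | some v =>
      rw [pvStep_some hiv]
      by_cases hv1 : v = "Paraphrase"
      · rw [if_pos hv1,
          ih (d1.insert x.1 x.2) d2 d3 d4 d5 hnd' (hxfresh d1 h1) (htail d2 h2) (htail d3 h3) (htail d4 h4) (htail d5 h5)]
        simp [hins d1 h1, hiv, hv1]
      rw [if_neg hv1]
      by_cases hv2 : v = "Contradiction"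
      · rw [if_pos hv2,
          ih d1 (d2.insert x.1 x.2) d3 d4 d5 hnd' (htail d1 h1) (hxfresh d2 h2) (htail d3 h3) (htail d4 h4) (htail d5 h5)]
        simp [hins d2 h2, hiv, hv2]
      rw [if_neg hv2]
      by_cases hv3 : v = "Numerical_paraphrase"
      · rw [if_pos hv3,
          ih d1 d2 (d3.insert x.1 x.2) d4 d5 hnd' (htail d1 h1) (htail d2 h2) (hxfresh d3 h3) (htail d4 h4) (htail d5 h5)]
        simp [hins d3 h3, hiv, hv3]
      rw [if_neg hv3]
      by_cases hv4 : v = "Numerical_contradiction"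
      · rw [if_pos hv4,
          ih d1 d2 d3 (d4.insert x.1 x.2) d5 hnd' (htail d1 h1) (htail d2 h2) (htail d3 h3) (hxfresh d4 h4) (htail d5 h5)]
        simp [hins d4 h4, hiv, hv4]
      rw [if_neg hv4]
      by_cases hv5 : v = "Text_appended"
      · rw [if_pos hv5,
          ih d1 d2 d3 d4 (d5.insert x.1 x.2) hnd' (htail d1 h1) (htail d2 h2) (htail d3 h3) (htail d4 h4) (hxfresh d5 h5)]
        simp [hins d5 h5, hiv, hv5]
      rw [if_neg hv5,
        ih d1 d2 d3 d4 d5 hnd' (htail d1 h1) (htail d2 h2) (htail d3 h3) (htail d4 h4) (htail d5 h5)]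
      simp [hiv, hv1, hv2, hv3, hv4, hv5]

-- ===== VERDICT (by name: the statement is the Claim_ definition above) =====
theorem extract_by_intervention_spec : Claim_equal_extract_by_intervention := by
  intro predictions gold _ _
  unfold Spec_extract_by_intervention extract_by_intervention extract_by_intervention_alt
  simp only [PySem.Dict.keys]
  rw [List.foldl_map]
  rw [PySem.List.foldl_congr_mem _ _ (pvStep gold) _ (by
    intro acc p hp
    have hval : (PySem.Dict.ofList predictions).getD p.1 "" = p.2 :=
      PySem.Dict.getD_of_mem_items _ (by simpa using hp) (PySem.Dict.nodup_keys_ofList predictions) ""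
    unfold pvStep
    rw [hval])]
  rw [pvLoop_items gold ((PySem.Dict.ofList predictions).items) _ _ _ _ _
    (PySem.Dict.nodup_keys_ofList predictions)
    (fun p _ => PySem.Dict.contains_empty p.1) (fun p _ => PySem.Dict.contains_empty p.1)
    (fun p _ => PySem.Dict.contains_empty p.1) (fun p _ => PySem.Dict.contains_empty p.1)
    (fun p _ => PySem.Dict.contains_empty p.1)]
  simp [pvBucket_eq_filter, PySem.Dict.empty]
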